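-- pv_equiv track=rewrite | github.com/ZHouQiang1176/RLEA_FP | fullplace_env.py | get_node_to_net_dict
-- ===== SOURCE A (Python) =====
-- def get_node_to_net_dict(node_info, net_info):
--     node_to_net_dict = {}
--     for node_name in node_info:
--         node_to_net_dict[node_name] = set()
--     for net_name in net_info:
--         for node_name in net_info[net_name]["nodes"]:
--             node_to_net_dict[node_name].add(net_name)
--     for node_name in node_info:
--         node_to_net_dict[node_name] = list(node_to_net_dict[node_name])
--         node_to_net_dict[node_name].sort()
--     return node_to_net_dict
-- ===== SOURCE B (Python) =====
-- def get_node_to_net_dict(node_info, net_info):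
--     result = {node_name: [] for node_name in node_info}
--     for net_name in sorted(net_info):
--         for node_name in net_info[net_name]["nodes"]:
--             lst = result[node_name]
--             if not lst or lst[-1] != net_name:
--                 lst.append(net_name)
--     return result
-- ===== Notes on version B (the rewrite author's own statement) =====
-- stated objective: simpler
-- what changed: Instead of collecting a set of nets per node and sorting each node's list afterwards, B sorts the net names once up front and appends each net to its member nodes' lists in that order, deduplicating duplicate node occurrences within a net by comparing with the list's last element, so no per-node set or per-node sort is needed.
import Mathlib
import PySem

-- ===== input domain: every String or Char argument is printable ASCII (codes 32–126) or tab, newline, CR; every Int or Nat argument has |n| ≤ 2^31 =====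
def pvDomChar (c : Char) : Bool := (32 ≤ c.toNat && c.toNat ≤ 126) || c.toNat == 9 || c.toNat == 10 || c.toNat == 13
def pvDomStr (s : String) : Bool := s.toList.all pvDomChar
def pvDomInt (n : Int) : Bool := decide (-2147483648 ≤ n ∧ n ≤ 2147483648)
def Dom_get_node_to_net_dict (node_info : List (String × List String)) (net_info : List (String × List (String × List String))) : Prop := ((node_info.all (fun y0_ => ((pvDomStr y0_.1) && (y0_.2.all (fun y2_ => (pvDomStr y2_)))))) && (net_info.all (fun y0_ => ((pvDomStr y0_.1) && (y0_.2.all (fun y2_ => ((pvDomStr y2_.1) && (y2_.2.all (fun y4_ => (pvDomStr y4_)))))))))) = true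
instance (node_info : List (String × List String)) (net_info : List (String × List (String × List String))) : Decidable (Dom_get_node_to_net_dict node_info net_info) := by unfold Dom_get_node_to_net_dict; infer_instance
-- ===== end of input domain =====

-- B builds each node's list directly in sorted order by visiting the net names pre-sorted,
-- instead of collecting a per-node set and sorting each node's list afterwards (objective: simpler).

-- ===== PORT A =====
def get_node_to_net_dict (node_info : List (String × List String)) (net_info : List (String × List (String × List String))) : List (String × List String) :=
  let dn := PySem.Dict.ofList node_info
  let dnet := PySem.Dict.ofList net_info
  -- node_to_net_dict = {}; for node_name in node_info: node_to_net_dict[node_name] = set()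
  let d0 : PySem.Dict String (List String) :=
    dn.keys.foldl (fun d k => d.insert k PySem.Set.empty) PySem.Dict.empty
  -- for net_name in net_info: for node_name in net_info[net_name]["nodes"]:
  --     node_to_net_dict[node_name].add(net_name)
  -- (d[node_name] raises KeyError when node_name is absent: excluded by Pre_; getD totalizes)
  let d1 := dnet.keys.foldl (fun d net =>
    ((PySem.Dict.ofList (dnet.getD net [])).getD "nodes" []).foldl
      (fun d node => d.insert node (PySem.Set.add (d.getD node []) net)) d) d0
  -- for node_name in node_info: node_to_net_dict[node_name] = sorted(list(...))
  let d2 := dn.keys.foldl (fun d k => d.insert k (PySem.List.sorted (d.getD k []) (fun x => x) false)) d1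
  d2.items

-- ===== PORT B =====
def get_node_to_net_dict_alt (node_info : List (String × List String)) (net_info : List (String × List (String × List String))) : List (String × List String) :=
  let dnet := PySem.Dict.ofList net_info
  -- result = {node_name: [] for node_name in node_info}
  let result0 : PySem.Dict String (List String) :=
    (PySem.Dict.ofList node_info).keys.foldl (fun d k => d.insert k ([] : List String)) PySem.Dict.empty
  -- for net_name in sorted(net_info): for node_name in net_info[net_name]["nodes"]:
  --     lst = result[node_name]; if not lst or lst[-1] != net_name: lst.append(net_name)
  -- (result[node_name] raises KeyError when node_name is absent: excluded by Pre_; getD totalizes)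
  let result := (PySem.List.sorted dnet.keys (fun x => x) false).foldl (fun d net =>
    ((PySem.Dict.ofList (dnet.getD net [])).getD "nodes" []).foldl
      (fun d node =>
        if (d.getD node []).getLast? = some net then d
        else d.insert node ((d.getD node []) ++ [net])) d) result0
  result.items

-- ===== PRECONDITION & SPEC =====
-- the node list of the net named `net` (after dict conversion of the inputs)
def pvNodes_get_node_to_net_dict (net_info : List (String × List (String × List String))) (net : String) : List String :=
  (PySem.Dict.ofList ((PySem.Dict.ofList net_info).getD net [])).getD "nodes" []

-- Pre_ excludes exactly the inputs where Python A raises KeyError: a net whose dict lacks the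
-- "nodes" key, or a net listing a node that is not a key of node_info.
def Pre_get_node_to_net_dict (node_info : List (String × List String)) (net_info : List (String × List (String × List String))) : Prop :=
  ∀ net ∈ (PySem.Dict.ofList net_info).keys,
    (PySem.Dict.ofList ((PySem.Dict.ofList net_info).getD net [])).contains "nodes" = true ∧
    ∀ node ∈ pvNodes_get_node_to_net_dict net_info net,
      (PySem.Dict.ofList node_info).contains node = true
instance (node_info : List (String × List String)) (net_info : List (String × List (String × List String))) : Decidable (Pre_get_node_to_net_dict node_info net_info) := by unfold Pre_get_node_to_net_dict; infer_instance

def pvWitness_get_node_to_net_dict : (List (String × List String)) × (List (String × List (String × List String))) :=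
  ([("a", []), ("b", [])], [("n2", [("nodes", ["a", "b", "a"])]), ("n1", [("nodes", ["b"])])])

def Spec_get_node_to_net_dict (node_info : List (String × List String)) (net_info : List (String × List (String × List String))) (out : List (String × List String)) : Prop := out = get_node_to_net_dict_alt node_info net_info
instance (node_info : List (String × List String)) (net_info : List (String × List (String × List String))) (out : List (String × List String)) : Decidable (Spec_get_node_to_net_dict node_info net_info out) := by unfold Spec_get_node_to_net_dict; infer_instance

-- ===== CLAIM (what is proved, stated in full; the proofs are below) =====
def Claim_equal_get_node_to_net_dict : Prop := ∀ (node_info : List (String × List String)) (net_info : List (String × List (String × List String))), Dom_get_node_to_net_dict node_info net_info → Pre_get_node_to_net_dict node_info net_info → Spec_get_node_to_net_dict node_info net_info (get_node_to_net_dict node_info net_info)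

-- ===== LEMMAS AND PROOFS =====

-- phase-1 loops of both ports: inserting a constant value at every key
theorem pv_getD_foldl_insert_const (K : List String) (v : List String) (d : PySem.Dict String (List String)) (k : String) :
    (K.foldl (fun d x => d.insert x v) d).getD k [] = if k ∈ K then v else d.getD k [] := by
  induction K generalizing d with
  | nil => simp
  | cons x t ih =>
    simp only [List.foldl_cons, ih, List.mem_cons]
    by_cases hx : k = x
    · subst hx; simp [PySem.Dict.getD_insert_self]
    · simp [PySem.Dict.getD_insert_of_ne _ _ _ hx, hx]

theorem pv_keys_foldl_insert_const (K : List String) (v : List String) (d : PySem.Dict String (List String)) :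
    (K.foldl (fun d x => d.insert x v) d).keys = PySem.Set.update d.keys K := by
  induction K generalizing d with
  | nil => rfl
  | cons x t ih =>
    simp only [List.foldl_cons, ih]
    have hstep : (d.insert x v).keys = PySem.Set.add d.keys x := by
      by_cases hc : d.contains x = true
      · rw [PySem.Dict.keys_insert_of_contains _ _ hc,
            PySem.Set.add_of_mem ((PySem.Dict.contains_iff_mem_keys _ _).mp hc)]
      · rw [PySem.Dict.keys_insert_of_not_contains _ _ (by simpa using hc),
            PySem.Set.add_of_not_mem]
        intro hm
        exact hc ((PySem.Dict.contains_iff_mem_keys _ _).mpr hm)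
    rw [hstep]; rfl

-- A's inner loop seen through one key
theorem pv_getD_foldA_inner (l : List String) (net k : String) (d : PySem.Dict String (List String)) :
    (l.foldl (fun d node => d.insert node (PySem.Set.add (d.getD node []) net)) d).getD k []
      = if k ∈ l then PySem.Set.add (d.getD k []) net else d.getD k [] := by
  induction l generalizing d with
  | nil => simp
  | cons x t ih =>
    simp only [List.foldl_cons, ih, List.mem_cons]
    by_cases hx : k = x
    · subst hx
      simp [PySem.Dict.getD_insert_self]
    · simp [PySem.Dict.getD_insert_of_ne _ _ _ hx, hx]

-- A's nets loop seen through one key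
theorem pv_getD_foldA_outer (N : List String) (nodes : String → List String) (k : String) (d : PySem.Dict String (List String)) :
    (N.foldl (fun d net => (nodes net).foldl (fun d node => d.insert node (PySem.Set.add (d.getD node []) net)) d) d).getD k []
      = (N.filter (fun net => decide (k ∈ nodes net))).foldl (fun s net => PySem.Set.add s net) (d.getD k []) := by
  induction N generalizing d with
  | nil => simp
  | cons n t ih =>
    simp only [List.foldl_cons, ih, List.filter_cons, pv_getD_foldA_inner]
    by_cases h : k ∈ nodes n <;> simp [h]

-- a dict is not changed at keys a fold never inserts
theorem pv_getD_foldl_insert_not_mem (t : List String) (k : String) (hk : k ∉ t)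
    (f : PySem.Dict String (List String) → String → List String) (d : PySem.Dict String (List String)) :
    (t.foldl (fun d x => d.insert x (f d x)) d).getD k [] = d.getD k [] := by
  induction t generalizing d with
  | nil => simp
  | cons x s ih =>
    simp only [List.foldl_cons]
    rw [ih (fun h => hk (List.mem_cons_of_mem _ h)),
        PySem.Dict.getD_insert_of_ne _ _ _ (by intro h; subst h; exact hk (List.mem_cons_self ..))]

-- A's final sorting loop seen through one key
theorem pv_getD_foldA_sort (K : List String) (hK : K.Nodup) (k : String) (hk : k ∈ K) (d : PySem.Dict String (List String)) :
    (K.foldl (fun d x => d.insert x (PySem.List.sorted (d.getD x []) (fun y => y) false)) d).getD k []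
      = PySem.List.sorted (d.getD k []) (fun y => y) false := by
  induction K generalizing d with
  | nil => cases hk
  | cons x t ih =>
    simp only [List.foldl_cons]
    rcases List.nodup_cons.mp hK with ⟨hxt, hnt⟩
    by_cases hx : k = x
    · subst hx
      rw [pv_getD_foldl_insert_not_mem t k hxt, PySem.Dict.getD_insert_self]
    · rcases List.mem_cons.mp hk with h | h
      · exact absurd h hx
      · rw [ih hnt h, PySem.Dict.getD_insert_of_ne _ _ _ hx]

-- B's inner loop seen through one key
theorem pv_getD_foldB_inner (l : List String) (net k : String) (d : PySem.Dict String (List String)) :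
    (l.foldl (fun d node =>
        if (d.getD node []).getLast? = some net then d
        else d.insert node ((d.getD node []) ++ [net])) d).getD k []
      = if k ∈ l then (if (d.getD k []).getLast? = some net then d.getD k [] else d.getD k [] ++ [net])
        else d.getD k [] := by
  induction l generalizing d with
  | nil => simp
  | cons x t ih =>
    simp only [List.foldl_cons, ih, List.mem_cons]
    by_cases hx : k = x
    · subst hx
      by_cases hl : (d.getD k []).getLast? = some net
      · simp [hl]
      · simp [hl, PySem.Dict.getD_insert_self]
    · have hne : ((if (d.getD x []).getLast? = some net then d
          else d.insert x ((d.getD x []) ++ [net])).getD k []) = d.getD k [] := by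
        split
        · rfl
        · exact PySem.Dict.getD_insert_of_ne _ _ _ hx
      simp [hne, hx]

-- B's nets loop seen through one key
theorem pv_getD_foldB_outer (S : List String) (nodes : String → List String) (k : String) (d : PySem.Dict String (List String)) :
    (S.foldl (fun d net => (nodes net).foldl (fun d node =>
        if (d.getD node []).getLast? = some net then d
        else d.insert node ((d.getD node []) ++ [net])) d) d).getD k []
      = S.foldl (fun l net => if k ∈ nodes net then (if l.getLast? = some net then l else l ++ [net]) else l) (d.getD k []) := by
  induction S generalizing d with
  | nil => simp
  | cons n t ih =>
    simp only [List.foldl_cons, ih, pv_getD_foldB_inner]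

-- the last-element guard over a strictly increasing visit order builds exactly the filtered list
theorem pv_chain_eq_filter (S : List String) (P : String → Prop) [DecidablePred P] (l0 : List String)
    (hS : S.Pairwise (· < ·)) (h0 : ∀ x ∈ l0, ∀ n ∈ S, x < n) :
    S.foldl (fun l net => if P net then (if l.getLast? = some net then l else l ++ [net]) else l) l0
      = l0 ++ S.filter (fun net => decide (P net)) := by
  induction S generalizing l0 with
  | nil => simp
  | cons n t ih =>
    rcases List.pairwise_cons.mp hS with ⟨hn, ht⟩
    simp only [List.foldl_cons, List.filter_cons]
    by_cases hp : P n
    · have hguard : ¬ l0.getLast? = some n := by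
        intro h
        exact lt_irrefl n (h0 n (List.mem_of_getLast? h) n (List.mem_cons_self ..))
      have h0' : ∀ x ∈ l0 ++ [n], ∀ m ∈ t, x < m := by
        intro x hx m hm
        rcases List.mem_append.mp hx with h1 | h1
        · exact h0 x h1 m (List.mem_cons_of_mem _ hm)
        · rw [List.mem_singleton.mp h1]; exact hn m hm
      rw [if_pos hp, if_neg hguard, ih (l0 ++ [n]) ht h0']
      simp [hp]
    · rw [if_neg hp, ih l0 ht (fun x hx m hm => h0 x hx m (List.mem_cons_of_mem _ hm))]
      simp [hp]

-- Set.update by elements already present changes nothing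
theorem pv_update_of_subset (s l : List String) (h : ∀ x ∈ l, x ∈ s) : PySem.Set.update s l = s := by
  induction l generalizing s with
  | nil => rfl
  | cons x t ih =>
    have hstep : PySem.Set.update s (x :: t) = PySem.Set.update (PySem.Set.add s x) t := rfl
    rw [hstep, PySem.Set.add_of_mem (h x (List.mem_cons_self ..))]
    exact ih s (fun y hy => h y (List.mem_cons_of_mem _ hy))

-- keys are unchanged by A's nets loop when every touched node is already a key
theorem pv_keys_foldA (N : List String) (nodes : String → List String) (d : PySem.Dict String (List String))
    (h : ∀ n ∈ N, ∀ x ∈ nodes n, x ∈ d.keys) :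
    (N.foldl (fun d net => (nodes net).foldl (fun d node => d.insert node (PySem.Set.add (d.getD node []) net)) d) d).keys = d.keys := by
  induction N generalizing d with
  | nil => rfl
  | cons n t ih =>
    simp only [List.foldl_cons]
    have hinner : ((nodes n).foldl (fun d node => d.insert node (PySem.Set.add (d.getD node []) n)) d).keys = d.keys := by
      rw [PySem.Dict.keys_foldl_insert]
      exact pv_update_of_subset _ _ (h n (List.mem_cons_self ..))
    rw [ih _ (fun m hm x hx => hinner ▸ h m (List.mem_cons_of_mem _ hm) x hx), hinner]

-- keys are unchanged by B's inner loop when every touched node is already a key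
theorem pv_keys_foldB_inner (l : List String) (net : String) (d : PySem.Dict String (List String))
    (h : ∀ x ∈ l, x ∈ d.keys) :
    (l.foldl (fun d node =>
        if (d.getD node []).getLast? = some net then d
        else d.insert node ((d.getD node []) ++ [net])) d).keys = d.keys := by
  induction l generalizing d with
  | nil => rfl
  | cons x t ih =>
    simp only [List.foldl_cons]
    have hkeys : ((if (d.getD x []).getLast? = some net then d
        else d.insert x ((d.getD x []) ++ [net]))).keys = d.keys := by
      split
      · rfl
      · exact PySem.Dict.keys_insert_of_contains _ _
          ((PySem.Dict.contains_iff_mem_keys _ _).mpr (h x (List.mem_cons_self ..)))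
    rw [ih _ (fun y hy => hkeys ▸ h y (List.mem_cons_of_mem _ hy)), hkeys]

-- keys are unchanged by B's nets loop when every touched node is already a key
theorem pv_keys_foldB (S : List String) (nodes : String → List String) (d : PySem.Dict String (List String))
    (h : ∀ n ∈ S, ∀ x ∈ nodes n, x ∈ d.keys) :
    (S.foldl (fun d net => (nodes net).foldl (fun d node =>
        if (d.getD node []).getLast? = some net then d
        else d.insert node ((d.getD node []) ++ [net])) d) d).keys = d.keys := by
  induction S generalizing d with
  | nil => rfl
  | cons n t ih =>
    simp only [List.foldl_cons]
    have hinner := pv_keys_foldB_inner (nodes n) n d (h n (List.mem_cons_self ..))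
    rw [ih _ (fun m hm x hx => hinner ▸ h m (List.mem_cons_of_mem _ hm) x hx), hinner]

-- the core equality, on abstract key / net / membership data
theorem pv_core (K N : List String) (nodes : String → List String)
    (hK : K.Nodup) (hN : N.Nodup) (hsub : ∀ n ∈ N, ∀ x ∈ nodes n, x ∈ K) :
    (K.foldl (fun d k => d.insert k (PySem.List.sorted (d.getD k []) (fun x => x) false))
       (N.foldl (fun d net => (nodes net).foldl (fun d node => d.insert node (PySem.Set.add (d.getD node []) net)) d)
          (K.foldl (fun d k => d.insert k PySem.Set.empty) PySem.Dict.empty))).items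
    = ((PySem.List.sorted N (fun x => x) false).foldl (fun d net => (nodes net).foldl (fun d node =>
          if (d.getD node []).getLast? = some net then d
          else d.insert node ((d.getD node []) ++ [net])) d)
        (K.foldl (fun d k => d.insert k ([] : List String)) PySem.Dict.empty)).items := by
  have hS : (PySem.List.sorted N (fun x => x) false).Perm N := PySem.List.sorted_perm N _ false
  have hSnd : (PySem.List.sorted N (fun x => x) false).Nodup := hS.nodup_iff.mpr hN
  have hSlt : (PySem.List.sorted N (fun x => x) false).Pairwise (· < ·) := by
    have hle := PySem.List.sorted_pairwise N (fun x => x)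
    exact (hle.and hSnd).imp (fun h => lt_of_le_of_ne h.1 h.2)
  -- keys of A's phase-1 dict
  have keysA0 : ((K.foldl (fun d k => d.insert k PySem.Set.empty) PySem.Dict.empty) :
      PySem.Dict String (List String)).keys = K := by
    rw [pv_keys_foldl_insert_const]
    show PySem.Set.update ([] : List String) K = K
    rw [PySem.Set.update_nil_left, PySem.Set.ofList_eq_self_of_nodup _ hK]
  have keysA1 : ((N.foldl (fun d net => (nodes net).foldl (fun d node => d.insert node (PySem.Set.add (d.getD node []) net)) d)
      (K.foldl (fun d k => d.insert k PySem.Set.empty) PySem.Dict.empty)) :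
      PySem.Dict String (List String)).keys = K := by
    rw [pv_keys_foldA _ _ _ (by rw [keysA0]; exact hsub), keysA0]
  have keysA2 : ((K.foldl (fun d k => d.insert k (PySem.List.sorted (d.getD k []) (fun x => x) false))
      (N.foldl (fun d net => (nodes net).foldl (fun d node => d.insert node (PySem.Set.add (d.getD node []) net)) d)
        (K.foldl (fun d k => d.insert k PySem.Set.empty) PySem.Dict.empty))) :
      PySem.Dict String (List String)).keys = K := by
    rw [PySem.Dict.keys_foldl_insert, keysA1, pv_update_of_subset _ _ (fun x hx => hx)]
  have keysB0 : ((K.foldl (fun d k => d.insert k ([] : List String)) PySem.Dict.empty) :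
      PySem.Dict String (List String)).keys = K := by
    rw [pv_keys_foldl_insert_const]
    show PySem.Set.update ([] : List String) K = K
    rw [PySem.Set.update_nil_left, PySem.Set.ofList_eq_self_of_nodup _ hK]
  have keysB1 : (((PySem.List.sorted N (fun x => x) false).foldl (fun d net => (nodes net).foldl (fun d node =>
        if (d.getD node []).getLast? = some net then d
        else d.insert node ((d.getD node []) ++ [net])) d)
      (K.foldl (fun d k => d.insert k ([] : List String)) PySem.Dict.empty)) :
      PySem.Dict String (List String)).keys = K := by
    rw [pv_keys_foldB _ _ _ (by rw [keysB0]; intro n hn; exact hsub n (hS.mem_iff.mp hn)), keysB0]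
  rw [PySem.Dict.items_eq_map_keys _ (keysA2.symm ▸ hK) ([] : List String),
      PySem.Dict.items_eq_map_keys _ (keysB1.symm ▸ hK) ([] : List String), keysA2, keysB1]
  apply List.map_congr_left
  intro k hk
  -- A's value at k
  rw [pv_getD_foldA_sort K hK k hk, pv_getD_foldA_outer,
      pv_getD_foldl_insert_const, if_pos hk]
  -- B's value at k
  rw [pv_getD_foldB_outer, pv_getD_foldl_insert_const, if_pos hk,
      pv_chain_eq_filter _ (fun net => k ∈ nodes net) [] hSlt (by intro x hx; cases hx)]
  -- both are the sorted filtered net list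
  have hA : (N.filter (fun net => decide (k ∈ nodes net))).foldl (fun s net => PySem.Set.add s net) PySem.Set.empty
      = PySem.Set.ofList (N.filter (fun net => decide (k ∈ nodes net))) :=
    (PySem.Set.ofList_eq_foldl _).symm
  rw [hA, PySem.Set.ofList_eq_self_of_nodup _ (hN.filter _)]
  rw [PySem.List.sorted_eq_of_perm_of_pairwise_lt _ _ _
      (hS.filter _) (List.Pairwise.sublist List.filter_sublist hSlt)]
  simp

-- ===== VERDICT (by name: the statement is the Claim_ definition above) =====
theorem get_node_to_net_dict_spec : Claim_equal_get_node_to_net_dict := by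
  intro node_info net_info _hdom hpre
  show get_node_to_net_dict node_info net_info = get_node_to_net_dict_alt node_info net_info
  simp only [get_node_to_net_dict, get_node_to_net_dict_alt]
  exact pv_core (PySem.Dict.ofList node_info).keys (PySem.Dict.ofList net_info).keys
    (pvNodes_get_node_to_net_dict net_info)
    (PySem.Dict.nodup_keys_ofList _) (PySem.Dict.nodup_keys_ofList _)
    (fun n hn x hx => (PySem.Dict.contains_iff_mem_keys _ _).mp ((hpre n hn).2 x hx))
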